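-- pv_equiv track=rewrite | github.com/LiuYangyangSDU/BINDER | BINDER.py | extract_consecutive_numbers
-- ===== SOURCE A (Python) =====
-- def extract_consecutive_numbers(lst):
--     consecutive_sequences = []
--     sequence = []
--
--     for num in lst:
--         if not sequence or num == sequence[-1] + 1:
--             sequence.append(num)
--         else:
--             if len(sequence) >= 3:
--                 consecutive_sequences.append(sequence)
--             sequence = [num]
--
--     # 检查最后一个序列
--     if len(sequence) >= 3:
--         consecutive_sequences.append(sequence)
--
--     return consecutive_sequences
-- ===== SOURCE B (Python) =====
-- from itertools import groupby
--
--
-- def extract_consecutive_numbers(lst):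
--     # maximal runs of consecutive +1 integers = groups of constant (value - index)
--     runs = [[v for _, v in g]
--             for _, g in groupby(enumerate(lst), key=lambda p: p[1] - p[0])]
--     return [run for run in runs if len(run) >= 3]
-- ===== Notes on version B (the rewrite author's own statement) =====
-- stated objective: idiomatic
-- what changed: Replaces the inline accumulator-with-flush loop by itertools.groupby over enumerate(lst) keyed on value-index (constant exactly on a +1 run), followed by a length>=3 filter.
import Mathlib
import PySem

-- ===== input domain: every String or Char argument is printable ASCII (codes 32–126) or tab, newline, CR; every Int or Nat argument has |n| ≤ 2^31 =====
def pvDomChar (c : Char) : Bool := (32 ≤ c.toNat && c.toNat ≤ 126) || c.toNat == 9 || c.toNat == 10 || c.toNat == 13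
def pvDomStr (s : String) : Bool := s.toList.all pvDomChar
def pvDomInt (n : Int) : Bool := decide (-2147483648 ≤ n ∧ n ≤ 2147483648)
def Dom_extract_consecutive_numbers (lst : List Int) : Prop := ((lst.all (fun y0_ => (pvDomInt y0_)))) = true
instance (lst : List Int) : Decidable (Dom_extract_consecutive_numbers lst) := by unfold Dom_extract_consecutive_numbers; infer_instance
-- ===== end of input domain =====

-- B replaces A's accumulator-with-flush loop by a group-by (value - index) over the
-- enumerated list followed by a length ≥ 3 filter (idiomatic decomposition; same cost).

-- ===== PORT A =====
-- one loop iteration of A: 'if not sequence or num == sequence[-1] + 1: …'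
def pvStepA (st : List (List Int) × List Int) (num : Int) : List (List Int) × List Int :=
  match st.2.getLast? with
  | none => (st.1, st.2 ++ [num])
  | some l =>
      if num = l + 1 then (st.1, st.2 ++ [num])
      else ((if 3 ≤ st.2.length then st.1 ++ [st.2] else st.1), [num])

def extract_consecutive_numbers (lst : List Int) : List (List Int) :=
  let st := lst.foldl pvStepA ([], [])
  if 3 ≤ st.2.length then st.1 ++ [st.2] else st.1

-- ===== PORT B =====
-- enumerate(lst) starting at index i
def pvEnumFrom (i : Int) : List Int → List (Int × Int)
  | [] => []
  | x :: xs => (i, x) :: pvEnumFrom (i + 1) xs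

-- itertools.groupby (consecutive elements with equal key), key p ↦ p.2 - p.1,
-- with the current group accumulated in reverse
def pvGroupAux (k : Int) (cur : List (Int × Int)) : List (Int × Int) → List (List (Int × Int))
  | [] => [cur.reverse]
  | p :: ps =>
      if p.2 - p.1 = k then pvGroupAux k (p :: cur) ps
      else cur.reverse :: pvGroupAux (p.2 - p.1) [p] ps

def pvGroups : List (Int × Int) → List (List (Int × Int))
  | [] => []
  | p :: ps => pvGroupAux (p.2 - p.1) [p] ps

def extract_consecutive_numbers_alt (lst : List Int) : List (List Int) :=
  ((pvGroups (pvEnumFrom 0 lst)).map (fun g => g.map Prod.snd)).filter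
    (fun run => 3 ≤ run.length)

-- ===== PRECONDITION & SPEC =====
def Spec_extract_consecutive_numbers (lst : List Int) (out : List (List Int)) : Prop := out = extract_consecutive_numbers_alt lst
instance (lst : List Int) (out : List (List Int)) : Decidable (Spec_extract_consecutive_numbers lst out) := by unfold Spec_extract_consecutive_numbers; infer_instance

-- ===== CLAIM (what is proved, stated in full; the proofs are below) =====
def Claim_equal_extract_consecutive_numbers : Prop := ∀ (lst : List Int), Dom_extract_consecutive_numbers lst → Spec_extract_consecutive_numbers lst (extract_consecutive_numbers lst)

-- ===== LEMMAS AND PROOFS =====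

-- A's final flush applied to an explicit state
def pvFinA (st : List (List Int) × List Int) : List (List Int) :=
  if 3 ≤ st.2.length then st.1 ++ [st.2] else st.1

-- main invariant: A's loop on the remaining list, with current run (c :: cur) (c last),
-- equals the filtered groups produced by pvGroupAux, provided c sits at index i - 1.
theorem pvMain (xs : List Int) : ∀ (i : Int) (cs : List (List Int))
    (c : Int × Int) (cur : List (Int × Int)), c.1 = i - 1 →
    pvFinA (xs.foldl pvStepA (cs, (c :: cur).reverse.map Prod.snd))
      = cs ++ ((pvGroupAux (c.2 - c.1) (c :: cur) (pvEnumFrom i xs)).map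
          (fun g => g.map Prod.snd)).filter (fun run => 3 ≤ run.length) := by
  induction xs with
  | nil =>
      intro i cs c cur hc
      simp [pvFinA, pvGroupAux, pvEnumFrom]
      by_cases h : 3 ≤ cur.length + 1
      · simp [h]
        omega
      · simp [h]
        omega
  | cons x xs ih =>
      intro i cs c cur hc
      have hstep : pvStepA (cs, (c :: cur).reverse.map Prod.snd) x =
          (if x = c.2 + 1 then (cs, ((i, x) :: c :: cur).reverse.map Prod.snd)
           else ((if 3 ≤ cur.length + 1 then cs ++ [(c :: cur).reverse.map Prod.snd] else cs),
                 ((⟨i, x⟩ : Int × Int) :: ([] : List (Int × Int))).reverse.map Prod.snd)) := by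
        simp [pvStepA]
      rw [List.foldl_cons, hstep]
      by_cases hx : x = c.2 + 1
      · simp only [if_pos hx]
        have hkey : x - i = c.2 - c.1 := by omega
        have h2 := ih (i + 1) cs (i, x) (c :: cur) (by simp)
        rw [h2]
        simp [pvEnumFrom, pvGroupAux, hkey]
      · simp only [if_neg hx]
        have hkey : ¬ (x - i = c.2 - c.1) := by omega
        have h2 := ih (i + 1) (if 3 ≤ cur.length + 1 then cs ++ [(c :: cur).reverse.map Prod.snd] else cs) (i, x) [] (by simp)
        rw [h2]
        simp only [pvEnumFrom, pvGroupAux, hkey, if_false, List.map_cons,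
          List.filter_cons, List.length_map, List.length_reverse, List.length_cons]
        by_cases h : 3 ≤ cur.length + 1
        · rw [if_pos h, if_pos (by simpa using h)]
          simp
        · rw [if_neg h, if_neg (by simpa using h)]

-- ===== VERDICT (by name: the statement is the Claim_ definition above) =====
theorem extract_consecutive_numbers_spec : Claim_equal_extract_consecutive_numbers := by
  intro lst _
  show extract_consecutive_numbers lst = extract_consecutive_numbers_alt lst
  cases lst with
  | nil => rfl
  | cons x xs =>
      have h := pvMain xs 1 [] (0, x) [] (by simp)
      simp only [extract_consecutive_numbers, extract_consecutive_numbers_alt,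
        pvGroups, pvEnumFrom] at *
      simpa [pvFinA, pvStepA] using h
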